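-- pv_equiv track=rewrite | github.com/whatever60/splisosm_apa_caller | utils_annot.py | _parse_attributes_gff3
-- ===== SOURCE A (Python) =====
-- def _parse_attributes_gff3(attribute: str) -> tuple[str, str]:
--     """
--     Parse the attribute string from a GFF3 annotation file to extract the parent gene ID and the element ID.
--
--     Args:
--         attribute (str): Attribute string from a GFF3 file, containing multiple key-value pairs separated by semicolons.
--
--     Returns:
--         tuple: A tuple containing the parent gene ID and the element ID.
--     """
--     parent_gene_id, element_id = None, None
--     for attr in attribute.split(";"):
--         if attr.startswith("Parent=gene:"):
--             parent_gene_id = attr.split(":")[1]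
--         elif attr.startswith("ID=transcript:"):
--             element_id = attr.split(":")[1]
--     return parent_gene_id, element_id
-- ===== SOURCE B (Python) =====
-- def _last_with_prefix(segs, prefix):
--     for seg in reversed(segs):
--         if seg.startswith(prefix):
--             return seg.split(":")[1]
--     return None
--
--
-- def _parse_attributes_gff3(attribute: str) -> tuple[str, str]:
--     segs = attribute.split(";")
--     return (_last_with_prefix(segs, "Parent=gene:"),
--             _last_with_prefix(segs, "ID=transcript:"))
-- ===== Notes on version B (the rewrite author's own statement) =====
-- stated objective: alternative
-- what changed: Replaces the single forward pass that overwrites two mutable variables with two backward scans (reversed + early return), each returning the first match from the end, which equals A's last-wins behaviour.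
import Mathlib
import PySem

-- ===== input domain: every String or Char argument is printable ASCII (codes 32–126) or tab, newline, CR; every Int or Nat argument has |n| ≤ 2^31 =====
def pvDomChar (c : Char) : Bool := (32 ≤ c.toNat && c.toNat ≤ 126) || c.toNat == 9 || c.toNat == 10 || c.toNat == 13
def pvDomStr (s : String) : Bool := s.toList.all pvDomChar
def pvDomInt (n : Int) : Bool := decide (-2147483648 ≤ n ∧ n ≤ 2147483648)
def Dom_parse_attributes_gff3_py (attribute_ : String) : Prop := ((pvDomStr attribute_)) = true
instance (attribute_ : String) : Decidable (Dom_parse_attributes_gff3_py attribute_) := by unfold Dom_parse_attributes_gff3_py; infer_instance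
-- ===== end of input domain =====

-- B replaces A's forward pass that overwrites two mutable variables with two backward early-exit scans (objective: alternative; same cost).

-- ===== PORT A =====
-- s.split(sep) for the nonempty literal separators ";" and ":" : Str.split? is none only for sep = "", so .getD [] is exact.
-- attr.split(":")[1] — the startswith guard guarantees attr contains ':', so index 1 exists and pyGet?'s none (IndexError) is unreachable; .getD "" there.
def parse_attributes_gff3_py (attribute_ : String) : Option String × Option String :=
  ((PySem.Str.split? attribute_ ";").getD []).foldl
    (fun st attr =>
      if PySem.Str.startswith attr "Parent=gene:" then
        (some ((PySem.List.pyGet? ((PySem.Str.split? attr ":").getD []) 1).getD ""), st.2)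
      else if PySem.Str.startswith attr "ID=transcript:" then
        (st.1, some ((PySem.List.pyGet? ((PySem.Str.split? attr ":").getD []) 1).getD ""))
      else st)
    (none, none)

-- ===== PORT B =====
-- 'for seg in reversed(segs): if seg.startswith(prefix): return seg.split(":")[1]' — same split/index remarks as in port A.
def pvLastWithPrefix : List String → String → Option String
  | [], _ => none
  | seg :: rest, pre =>
      if PySem.Str.startswith seg pre then
        some ((PySem.List.pyGet? ((PySem.Str.split? seg ":").getD []) 1).getD "")
      else pvLastWithPrefix rest pre

def parse_attributes_gff3_py_alt (attribute_ : String) : Option String × Option String :=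
  let segs := (PySem.Str.split? attribute_ ";").getD []
  (pvLastWithPrefix segs.reverse "Parent=gene:",
   pvLastWithPrefix segs.reverse "ID=transcript:")

-- ===== PRECONDITION & SPEC =====
def Spec_parse_attributes_gff3_py (attribute_ : String) (out : Option String × Option String) : Prop := out = parse_attributes_gff3_py_alt attribute_
instance (attribute_ : String) (out : Option String × Option String) : Decidable (Spec_parse_attributes_gff3_py attribute_ out) := by unfold Spec_parse_attributes_gff3_py; infer_instance

-- ===== CLAIM (what is proved, stated in full; the proofs are below) =====
def Claim_equal_parse_attributes_gff3_py : Prop := ∀ (attribute_ : String), Dom_parse_attributes_gff3_py attribute_ → Spec_parse_attributes_gff3_py attribute_ (parse_attributes_gff3_py attribute_)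

-- ===== LEMMAS AND PROOFS =====

-- no segment starts with both prefixes (their first characters differ)
theorem pv_not_both (seg : String)
    (h1 : PySem.Str.startswith seg "Parent=gene:" = true)
    (h2 : PySem.Str.startswith seg "ID=transcript:" = true) : False := by
  simp only [PySem.Str.startswith_eq] at h1 h2
  rw [PySem.Chars.startswith_iff] at h1 h2
  obtain ⟨t, ht⟩ := h1
  obtain ⟨u, hu⟩ := h2
  have h0 : some 'P' = some 'I' := congrArg List.head? (ht.trans hu.symm)
  simp at h0

-- scanning from the end of l ++ [seg] : first search l's part, else try seg
theorem pvLastWithPrefix_append (l : List String) (seg : String) (pre : String) :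
    pvLastWithPrefix (l ++ [seg]) pre
      = (pvLastWithPrefix l pre).or (pvLastWithPrefix [seg] pre) := by
  induction l with
  | nil => simp [pvLastWithPrefix]
  | cons x xs ih =>
      by_cases h : PySem.Str.startswith x pre = true <;>
        simp at h <;> simp [pvLastWithPrefix, h, ih]

-- A's forward last-wins fold over any segment list equals B's backward first-match scans
theorem pv_foldl_eq (segs : List String) (a b : Option String) :
    segs.foldl
      (fun st attr =>
        if PySem.Str.startswith attr "Parent=gene:" then
          (some ((PySem.List.pyGet? ((PySem.Str.split? attr ":").getD []) 1).getD ""), st.2)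
        else if PySem.Str.startswith attr "ID=transcript:" then
          (st.1, some ((PySem.List.pyGet? ((PySem.Str.split? attr ":").getD []) 1).getD ""))
        else st)
      (a, b)
      = ((pvLastWithPrefix segs.reverse "Parent=gene:").or a,
         (pvLastWithPrefix segs.reverse "ID=transcript:").or b) := by
  induction segs generalizing a b with
  | nil => simp [pvLastWithPrefix]
  | cons seg rest ih =>
      rw [List.foldl_cons, List.reverse_cons, pvLastWithPrefix_append,
        pvLastWithPrefix_append, Option.or_assoc, Option.or_assoc, ih]
      by_cases h1 : PySem.Str.startswith seg "Parent=gene:" = true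
      · by_cases h2 : PySem.Str.startswith seg "ID=transcript:" = true
        · exact absurd (pv_not_both seg h1 h2) (fun f => f)
        · simp at h1 h2
          simp [h1, h2, pvLastWithPrefix]
      · by_cases h2 : PySem.Str.startswith seg "ID=transcript:" = true
        · simp at h1 h2
          simp [h1, h2, pvLastWithPrefix]
        · simp at h1 h2
          simp [h1, h2, pvLastWithPrefix]

-- ===== VERDICT (by name: the statement is the Claim_ definition above) =====
theorem parse_attributes_gff3_py_spec : Claim_equal_parse_attributes_gff3_py := by
  intro attribute_ _
  unfold Spec_parse_attributes_gff3_py parse_attributes_gff3_py parse_attributes_gff3_py_alt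
  rw [pv_foldl_eq]
  simp
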